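-- pv_equiv track=rewrite | github.com/kkr010128/codebert | problem024/problem024_144.py | slove
-- ===== SOURCE A (Python) =====
-- def slove(goods, carnum, P):
--     tot_good = len(goods)
--     cur_good = 0
--     for _ in range(carnum):
--         load = 0
--         while cur_good < tot_good and goods[cur_good] <= P -load:
--             load += goods[cur_good]
--             cur_good += 1
--     if cur_good == tot_good:
--         return True
--     else:
--         return False
-- ===== SOURCE B (Python) =====
-- def slove(goods, carnum, P):
--     # Single pass over goods, counting cars needed, instead of iterating cars with an inner index scan.
--     if not goods:
--         return True
--     if carnum <= 0:
--         return False
--     cars = 1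
--     load = 0
--     for g in goods:
--         if g <= P - load:
--             load += g
--         elif g <= P:
--             cars += 1
--             load = g
--         else:
--             return False
--     return cars <= carnum
-- ===== Notes on version B (the rewrite author's own statement) =====
-- stated objective: simpler
-- what changed: Replaces the car-outer loop with inner index-driven while by a single pass over the goods that counts the cars needed and compares the count with carnum at the end.
import Mathlib
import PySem

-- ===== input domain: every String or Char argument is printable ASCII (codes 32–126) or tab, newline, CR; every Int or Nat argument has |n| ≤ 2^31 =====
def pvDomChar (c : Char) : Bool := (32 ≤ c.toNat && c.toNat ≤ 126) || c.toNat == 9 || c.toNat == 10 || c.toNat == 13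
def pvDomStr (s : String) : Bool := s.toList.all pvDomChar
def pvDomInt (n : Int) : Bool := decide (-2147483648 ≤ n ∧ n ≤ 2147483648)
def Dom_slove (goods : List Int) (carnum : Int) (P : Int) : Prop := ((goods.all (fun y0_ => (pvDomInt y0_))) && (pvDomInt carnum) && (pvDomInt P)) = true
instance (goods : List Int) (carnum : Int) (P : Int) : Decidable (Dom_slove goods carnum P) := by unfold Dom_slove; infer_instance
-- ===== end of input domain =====

-- B replaces A's car-outer loop (with its index-driven inner while) by one pass over the
-- goods that counts the cars needed; objective: simpler.

-- ===== PORT A =====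
-- inner `while cur_good < tot_good and goods[cur_good] <= P - load` loop of one car;
-- fuel bounds the iteration count (each step advances cur by 1, so goods.length - cur suffices)
def sloveCar (goods : List Int) (P : Int) : Nat → Int → Nat → Nat
  | 0, _, cur => cur
  | fuel + 1, load, cur =>
    if h : cur < goods.length then
      if goods[cur] ≤ P - load then sloveCar goods P fuel (load + goods[cur]) (cur + 1)
      else cur
    else cur

def slove (goods : List Int) (carnum : Int) (P : Int) : Bool :=
  let tot := goods.length
  let cur := (PySem.List.pyRange 0 carnum 1).foldl
    (fun cur _ => sloveCar goods P (tot - cur) 0 cur) 0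
  decide (cur = tot)

-- ===== PORT B =====
def sloveAltGo (P carnum : Int) : List Int → Int → Int → Bool
  | [], cars, _ => decide (cars ≤ carnum)
  | g :: rest, cars, load =>
    if g ≤ P - load then sloveAltGo P carnum rest cars (load + g)
    else if g ≤ P then sloveAltGo P carnum rest (cars + 1) g
    else false

def slove_alt (goods : List Int) (carnum : Int) (P : Int) : Bool :=
  if goods.isEmpty then true
  else if carnum ≤ 0 then false
  else sloveAltGo P carnum goods 1 0

-- ===== PRECONDITION & SPEC =====
def Spec_slove (goods : List Int) (carnum : Int) (P : Int) (out : Bool) : Prop := out = slove_alt goods carnum P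
instance (goods : List Int) (carnum : Int) (P : Int) (out : Bool) : Decidable (Spec_slove goods carnum P out) := by unfold Spec_slove; infer_instance

-- ===== CLAIM (what is proved, stated in full; the proofs are below) =====
def Claim_equal_slove : Prop := ∀ (goods : List Int) (carnum : Int) (P : Int), Dom_slove goods carnum P → Spec_slove goods carnum P (slove goods carnum P)

-- ===== LEMMAS AND PROOFS =====

-- abstract one-car consumption: drop the longest prefix that fits on a car already carrying `load`
def consume (P : Int) : List Int → Int → List Int
  | [], _ => []
  | g :: rest, load => if g ≤ P - load then consume P rest (load + g) else g :: rest

-- goods remaining after n fresh cars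
def aiter (P : Int) : Nat → List Int → List Int
  | 0, s => s
  | n + 1, s => aiter P n (consume P s 0)

theorem aiter_nil (P : Int) (n : Nat) : aiter P n [] = [] := by
  induction n with
  | zero => rfl
  | succ n ih => simpa [aiter, consume] using ih

theorem consume_suffix (P : Int) (s : List Int) (load : Int) :
    consume P s load <:+ s := by
  induction s generalizing load with
  | nil => simp [consume]
  | cons g rest ih =>
    by_cases h : g ≤ P - load
    · simpa [consume, h] using ((ih (load + g)).trans (List.suffix_cons g rest))
    · simp [consume, h]

theorem aiter_stuck (P : Int) (n : Nat) (g : Int) (rest : List Int) (h : ¬ g ≤ P) :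
    aiter P n (g :: rest) = g :: rest := by
  induction n with
  | zero => rfl
  | succ n ih =>
    have hc : consume P (g :: rest) 0 = g :: rest := by
      simp [consume]; omega
    simpa [aiter, hc] using ih

-- one car of A equals `consume`
theorem sloveCar_eq (goods : List Int) (P : Int) :
    ∀ (s : List Int) (load : Int) (cur : Nat), goods.drop cur = s → cur ≤ goods.length →
      sloveCar goods P s.length load cur = goods.length - (consume P s load).length := by
  intro s
  induction s with
  | nil =>
    intro load cur hdrop hle
    have hlen0 : goods.length - cur = 0 := by
      have := congrArg List.length hdrop
      simpa [List.length_drop] using this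
    have hcur : cur = goods.length := by omega
    simp [sloveCar, consume, hcur]
  | cons g rest ih =>
    intro load cur hdrop hle
    have hlen : goods.length - cur = rest.length + 1 := by
      have := congrArg List.length hdrop
      simpa [List.length_drop] using this
    have hcur : cur < goods.length := by omega
    have hget : goods[cur]'hcur = g := by
      have h0 : (goods.drop cur)[0]'(by simp [hdrop]) = g := by simp [hdrop]
      simpa [List.getElem_drop] using h0
    by_cases hfit : g ≤ P - load
    · have hdrop' : goods.drop (cur + 1) = rest := by
        rw [← List.tail_drop, hdrop]
        rfl
      have := ih (load + g) (cur + 1) hdrop' (by omega)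
      simp only [List.length_cons, sloveCar, dif_pos hcur, hget, if_pos hfit]
      rw [this, consume, if_pos hfit]
    · simp only [List.length_cons, sloveCar, dif_pos hcur, hget, if_neg hfit]
      rw [consume, if_neg hfit]
      simp [List.length_cons]
      omega

-- the outer `for _ in range(carnum)` fold of A, abstracted to `aiter`
theorem slove_fold (goods : List Int) (P : Int) (L : List Int) :
    ∀ (cur : Nat) (s : List Int), cur ≤ goods.length → goods.drop cur = s →
      goods.drop (L.foldl (fun c _ => sloveCar goods P (goods.length - c) 0 c) cur) =
        aiter P L.length s ∧
      L.foldl (fun c _ => sloveCar goods P (goods.length - c) 0 c) cur ≤ goods.length := by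
  induction L with
  | nil => intro cur s h1 h2; simpa [aiter] using ⟨h2, h1⟩
  | cons x L ih =>
    intro cur s h1 h2
    have hslen : goods.length - cur = s.length := by
      have := congrArg List.length h2
      simpa [List.length_drop] using this
    have hstep : sloveCar goods P (goods.length - cur) 0 cur =
        goods.length - (consume P s 0).length := by
      rw [hslen]; exact sloveCar_eq goods P s 0 cur h2 h1
    have hsuf : consume P s 0 <:+ goods :=
      (consume_suffix P s 0).trans (h2 ▸ List.drop_suffix cur goods)
    have hdrop' : goods.drop (goods.length - (consume P s 0).length) = consume P s 0 := by
      obtain ⟨t, ht⟩ := hsuf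
      have : t.length + (consume P s 0).length = goods.length := by
        simpa using congrArg List.length ht
      rw [show goods.length - (consume P s 0).length = t.length by omega, ← ht]
      simp
    have := ih (goods.length - (consume P s 0).length) (consume P s 0) (by omega) hdrop'
    simpa [List.foldl_cons, hstep, aiter] using this

theorem drop_isEmpty_decide (goods t : List Int) (F : Nat) (hd : goods.drop F = t)
    (hb : F ≤ goods.length) : decide (F = goods.length) = t.isEmpty := by
  subst hd
  rcases Nat.lt_or_ge F goods.length with h | h
  · have h1 : decide (F = goods.length) = false := by simp; omega
    have h2 : goods.drop F ≠ [] := by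
      intro hnil
      have := congrArg List.length hnil
      simp [List.length_drop] at this
      omega
    simp [h1, h2]
  · have : F = goods.length := le_antisymm hb h
    simp [this]

theorem slove_eq_aiter (goods : List Int) (carnum P : Int) :
    slove goods carnum P = (aiter P carnum.toNat goods).isEmpty := by
  have hlen : (PySem.List.pyRange 0 carnum 1).length = carnum.toNat := by
    simp [PySem.List.length_pyRange_one]
  obtain ⟨hd, hb⟩ := slove_fold goods P (PySem.List.pyRange 0 carnum 1) 0 goods (by omega) (by simp)
  rw [hlen] at hd
  unfold slove
  exact drop_isEmpty_decide goods _ _ hd hb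

theorem sloveAltGo_eq (P carnum : Int) :
    ∀ (s : List Int) (cars load : Int),
      sloveAltGo P carnum s cars load =
        (decide (cars ≤ carnum) && (aiter P (carnum - cars).toNat (consume P s load)).isEmpty) := by
  intro s
  induction s with
  | nil =>
    intro cars load
    simp [sloveAltGo, consume, aiter_nil]
  | cons g rest ih =>
    intro cars load
    by_cases hfit : g ≤ P - load
    · rw [sloveAltGo, if_pos hfit, ih]
      rw [consume, if_pos hfit]
    · by_cases hP : g ≤ P
      · rw [sloveAltGo, if_neg hfit, if_pos hP, ih]
        rw [consume, if_neg hfit]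
        have hc0 : consume P (g :: rest) 0 = consume P rest g := by
          rw [consume, if_pos (by omega)]
          norm_num
        by_cases hlt : cars < carnum
        · have ht : (carnum - cars).toNat = (carnum - (cars + 1)).toNat + 1 := by omega
          rw [ht]
          have haa : aiter P ((carnum - (cars + 1)).toNat + 1) (g :: rest) =
              aiter P (carnum - (cars + 1)).toNat (consume P rest g) := by
            rw [aiter, hc0]
          rw [haa]
          have d1 : decide (cars + 1 ≤ carnum) = true := by simp; omega
          have d2 : decide (cars ≤ carnum) = true := by simp; omega
          rw [d1, d2]
        · by_cases heq : cars = carnum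
          · have d1 : decide (cars + 1 ≤ carnum) = false := by simp; omega
            have ht : (carnum - cars).toNat = 0 := by omega
            rw [d1, ht]
            simp [aiter]
          · have d1 : decide (cars + 1 ≤ carnum) = false := by simp; omega
            have d2 : decide (cars ≤ carnum) = false := by simp; omega
            rw [d1, d2]
            simp
      · rw [sloveAltGo, if_neg hfit, if_neg hP]
        rw [consume, if_neg hfit, aiter_stuck P _ g rest hP]
        simp

-- ===== VERDICT (by name: the statement is the Claim_ definition above) =====
theorem slove_spec : Claim_equal_slove := by
  intro goods carnum P _
  unfold Spec_slove
  rw [slove_eq_aiter]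
  unfold slove_alt
  by_cases hnil : goods = []
  · simp [hnil, aiter_nil]
  · rw [if_neg (by simpa [List.isEmpty_iff] using hnil)]
    by_cases hc : carnum ≤ 0
    · rw [if_pos hc]
      have : carnum.toNat = 0 := by omega
      simp [this, aiter, hnil]
    · rw [if_neg hc, sloveAltGo_eq]
      have h1 : (1 : Int) ≤ carnum := by omega
      have ht : carnum.toNat = (carnum - 1).toNat + 1 := by omega
      rw [ht]
      simp [aiter, h1]
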